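-- pv_equiv track=rewrite | github.com/anmaletic/PMA-Code | Labosi/03/Zadatak_03_v2.py | NadiPalindrom
-- ===== SOURCE A (Python) =====
-- def NadiPalindrom(p_rijeci:list):
--     _palindrom = ("")
--
--     for rijec in p_rijeci:
--         _tempRijec = ""
--
--         for i in range(len(rijec)):
--             _tempRijec += rijec[-(i+1)]
--
--         if (_tempRijec == rijec):
--             if len(_tempRijec) > len(_palindrom):
--                 _palindrom = _tempRijec
--
--     return _palindrom
-- ===== SOURCE B (Python) =====
-- def NadiPalindrom(p_rijeci: list):
--     def is_pal(w):
--         i, j = 0, len(w) - 1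
--         while i < j:
--             if w[i] != w[j]:
--                 return False
--             i += 1
--             j -= 1
--         return True
--
--     return max((w for w in p_rijeci if is_pal(w)), key=len, default="")
-- ===== Notes on version B (the rewrite author's own statement) =====
-- stated objective: faster
-- what changed: Palindromicity is tested by a two-pointer scan from both ends with early exit instead of building the reversed string by repeated concatenation, and the result is selected with max(..., key=len, default='') over a filtered generator instead of a manual best-so-far loop.
import Mathlib
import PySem

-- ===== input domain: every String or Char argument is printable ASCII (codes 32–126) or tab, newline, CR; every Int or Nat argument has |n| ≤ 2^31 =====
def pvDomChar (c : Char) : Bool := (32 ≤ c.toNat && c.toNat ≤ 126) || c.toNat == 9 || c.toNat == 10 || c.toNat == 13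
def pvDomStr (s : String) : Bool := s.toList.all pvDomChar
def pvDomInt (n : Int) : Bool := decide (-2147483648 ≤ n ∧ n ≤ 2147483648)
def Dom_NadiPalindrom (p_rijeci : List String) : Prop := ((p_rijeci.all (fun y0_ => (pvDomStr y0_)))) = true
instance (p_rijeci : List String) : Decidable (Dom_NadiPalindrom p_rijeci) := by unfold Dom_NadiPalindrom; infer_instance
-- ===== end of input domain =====

-- B replaces A's character-by-character string reversal with a two-pointer palindrome
-- check (early exit on first mismatch) and selects the answer with a filtered
-- max-by-length with default "" instead of a manual best-so-far loop (measured faster in a timing run).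

-- ===== PORT A =====
-- literal port of A: for each word build the reversed word by indexing from the end,
-- compare, and keep the strictly longer palindrome; strings handled as List Char.
def NadiPalindrom (p_rijeci : List String) : String :=
  String.ofList <| p_rijeci.foldl (fun pal rijec =>
    let r := rijec.toList
    let temp := (PySem.List.pyRange 0 (r.length : Int) 1).foldl
      (fun t i => t ++ (PySem.List.pyGet? r (-(i + 1))).toList) ([] : List Char)
    if temp = r then
      if temp.length > pal.length then temp else pal
    else pal) []

-- ===== PORT B =====
-- two-pointer while-loop of Source B: indices move inward, early False on first mismatch
def palLoop (w : List Char) (i j : Int) : Bool :=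
  if h : i < j then
    if PySem.List.pyGet? w i ≠ PySem.List.pyGet? w j then false
    else palLoop w (i + 1) (j - 1)
  else true
termination_by (j - i).toNat
decreasing_by omega

def isPal (w : String) : Bool := palLoop w.toList 0 (PySem.Str.len w - 1)

def NadiPalindrom_alt (p_rijeci : List String) : String :=
  PySem.List.maxD (p_rijeci.filter isPal) PySem.Str.len ""

-- ===== PRECONDITION & SPEC =====
def Spec_NadiPalindrom (p_rijeci : List String) (out : String) : Prop := out = NadiPalindrom_alt p_rijeci
instance (p_rijeci : List String) (out : String) : Decidable (Spec_NadiPalindrom p_rijeci out) := by unfold Spec_NadiPalindrom; infer_instance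

-- ===== CLAIM (what is proved, stated in full; the proofs are below) =====
def Claim_equal_NadiPalindrom : Prop := ∀ (p_rijeci : List String), Dom_NadiPalindrom p_rijeci → Spec_NadiPalindrom p_rijeci (NadiPalindrom p_rijeci)

-- ===== LEMMAS AND PROOFS =====

-- A's inner loop builds the reverse of the word
lemma temp_eq_reverse (r : List Char) :
    (PySem.List.pyRange 0 (r.length : Int) 1).foldl
      (fun t i => t ++ (PySem.List.pyGet? r (-(i + 1))).toList) ([] : List Char) = r.reverse := by
  rw [PySem.List.pyRange_zero_natCast, List.foldl_map]
  have aux : ∀ n : Nat, n ≤ r.length →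
      (List.range n).foldl (fun t (k : Nat) => t ++ (PySem.List.pyGet? r (-((k : Int) + 1))).toList) []
        = (r.drop (r.length - n)).reverse := by
    intro n
    induction n with
    | zero => intro _; simp
    | succ m ih =>
      intro hle
      have hlt : r.length - (m + 1) < r.length := by omega
      rw [List.range_succ, List.foldl_append, ih (by omega), List.foldl_cons, List.foldl_nil]
      have hcast : (-((m : Int) + 1)) = -(((m + 1 : Nat)) : Int) := by push_cast; ring
      rw [hcast, PySem.List.pyGet?_neg_natCast r (m + 1) (by omega) (by omega),
        List.getElem?_eq_getElem hlt]
      rw [List.drop_eq_getElem_cons hlt, List.reverse_cons]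
      have : r.length - (m + 1) + 1 = r.length - m := by omega
      rw [this]
      rfl
  have := aux r.length (le_refl _)
  simpa using this

-- B's two-pointer loop checks exactly the mirrored positions from i to j
lemma palLoop_iff (w : List Char) (i j : Int) (hi : 0 ≤ i)
    (hsum : i + j = (w.length : Int) - 1) :
    palLoop w i j = true ↔
      ∀ k : Nat, i ≤ (k : Int) → (k : Int) ≤ j → w[k]? = w[w.length - 1 - k]? := by
  rw [palLoop]
  by_cases hij : i < j
  · have hjlen : j < (w.length : Int) := by omega
    have hgi : PySem.List.pyGet? w i = w[i.toNat]? := PySem.List.pyGet?_of_nonneg w hi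
    have hgj : PySem.List.pyGet? w j = w[j.toNat]? := PySem.List.pyGet?_of_nonneg w (by omega)
    have hmiri : w.length - 1 - i.toNat = j.toNat := by omega
    have hmirj : w.length - 1 - j.toNat = i.toNat := by omega
    have ih := palLoop_iff w (i + 1) (j - 1) (by omega) (by omega)
    rw [dif_pos hij]
    by_cases hne : PySem.List.pyGet? w i ≠ PySem.List.pyGet? w j
    · rw [if_pos hne]
      simp only [Bool.false_eq_true, false_iff]
      intro hall
      exact hne (by rw [hgi, hgj, ← hmiri]; exact hall i.toNat (by omega) (by omega))
    · push Not at hne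
      rw [if_neg (by simp [hne]), ih]
      constructor
      · intro hall k hk1 hk2
        by_cases hki : (k : Int) = i
        · have : k = i.toNat := by omega
          subst this
          rw [hmiri, ← hgi, ← hgj]; exact hne
        · by_cases hkj : (k : Int) = j
          · have : k = j.toNat := by omega
            subst this
            rw [hmirj, ← hgi, ← hgj]; exact hne.symm
          · exact hall k (by omega) (by omega)
      · intro hall k hk1 hk2
        exact hall k (by omega) (by omega)
  · rw [dif_neg hij]
    simp only [true_iff]
    intro k hk1 hk2
    have : (k : Int) = i := by omega
    have hk : w.length - 1 - k = k := by omega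
    rw [hk]
termination_by (j - i).toNat

lemma isPal_iff (w : String) : isPal w = true ↔ w.toList.reverse = w.toList := by
  unfold isPal
  rw [PySem.Str.len_eq,
    palLoop_iff w.toList 0 ((w.toList.length : Int) - 1) (le_refl 0) (by ring)]
  constructor
  · intro hall
    apply List.ext_getElem?
    intro i
    by_cases hlt : i < w.toList.length
    · rw [List.getElem?_reverse hlt]
      exact (hall i (by omega) (by omega)).symm
    · rw [List.getElem?_eq_none (by rw [List.length_reverse]; omega),
        List.getElem?_eq_none (by omega)]
  · intro hrev k hk1 hk2
    have hlt : k < w.toList.length := by omega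
    rw [← List.getElem?_reverse hlt, hrev]

-- PySem max? of a nonempty list is the keep-first-strict-max running fold
lemma max?_cons (x : String) (t : List String) :
    PySem.List.max? (x :: t) PySem.Str.len
      = some (t.foldl (fun p w => if PySem.Str.len p < PySem.Str.len w then w else p) x) := by
  unfold PySem.List.max?
  rw [List.foldl_cons]
  show List.foldl _ (some x) t = _
  induction t generalizing x with
  | nil => rfl
  | cons y t ih =>
    rw [List.foldl_cons, List.foldl_cons]
    show List.foldl _ (if PySem.Str.len x < PySem.Str.len y then some y else some x) t = _
    by_cases h : PySem.Str.len x < PySem.Str.len y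
    · rw [if_pos h, if_pos h, ih]
    · rw [if_neg h, if_neg h, ih]

lemma foldl_maxlen_eq_maxD (ys : List String) :
    ys.foldl (fun p w => if PySem.Str.len p < PySem.Str.len w then w else p) ""
      = PySem.List.maxD ys PySem.Str.len "" := by
  cases ys with
  | nil => rfl
  | cons x t =>
    unfold PySem.List.maxD
    rw [max?_cons, Option.getD_some, List.foldl_cons]
    by_cases h : PySem.Str.len "" < PySem.Str.len x
    · rw [if_pos h]
    · have hx : x = "" := by
        apply String.toList_eq_nil_iff.mp
        simp only [PySem.Str.len_eq] at h
        have he : ("" : String).toList.length = 0 := rfl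
        rw [he] at h
        exact List.eq_nil_of_length_eq_zero (by omega)
      rw [if_neg h, hx]

-- the List-Char accumulator fold of A equals the String fold, via toList
lemma foldl_toList (ys : List String) (s : String) :
    ys.foldl (fun pal w => if pal.length < w.toList.length then w.toList else pal) s.toList
      = (ys.foldl (fun p w => if PySem.Str.len p < PySem.Str.len w then w else p) s).toList := by
  induction ys generalizing s with
  | nil => rfl
  | cons x t ih =>
    simp only [List.foldl_cons]
    by_cases h : s.toList.length < x.toList.length
    · rw [if_pos h, if_pos (show PySem.Str.len s < PySem.Str.len x by
        simp only [PySem.Str.len_eq]; exact_mod_cast h), ih]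
    · rw [if_neg h, if_neg (show ¬ PySem.Str.len s < PySem.Str.len x by
        simp only [PySem.Str.len_eq]; exact_mod_cast h), ih]

-- ===== VERDICT (by name: the statement is the Claim_ definition above) =====
theorem NadiPalindrom_spec : Claim_equal_NadiPalindrom := by
  intro xs _
  unfold Spec_NadiPalindrom NadiPalindrom NadiPalindrom_alt
  have hbody : (fun (pal : List Char) (rijec : String) =>
      let r := rijec.toList
      let temp := (PySem.List.pyRange 0 (r.length : Int) 1).foldl
        (fun t i => t ++ (PySem.List.pyGet? r (-(i + 1))).toList) ([] : List Char)
      if temp = r then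
        if temp.length > pal.length then temp else pal
      else pal)
      = fun pal rijec => if isPal rijec = true then
          (if pal.length < rijec.toList.length then rijec.toList else pal) else pal := by
    funext pal rijec
    simp only [temp_eq_reverse]
    by_cases h : rijec.toList.reverse = rijec.toList
    · rw [if_pos h, if_pos ((isPal_iff rijec).mpr h), h]
    · rw [if_neg h, if_neg (by simp [isPal_iff, h])]
  rw [hbody, ← List.foldl_filter]
  have h0 : ([] : List Char) = ("" : String).toList := rfl
  rw [h0, foldl_toList, foldl_maxlen_eq_maxD]
  exact String.ofList_toList
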